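-- pv_equiv track=rewrite | github.com/YounesBensafia/SuffixArray-AlgorithmsAndComplexities | main.py | bucketsort_suffixes
-- ===== SOURCE A (Python) =====
-- def bucketsort_suffixes(suffixes):
--     max_len = max(len(suffix) for suffix, _ in suffixes)
--     buckets = [[] for _ in range(256)]
--     for i in range(max_len - 1, -1, -1):
--         for suffix, index in suffixes:
--             key = ord(suffix[i]) if i < len(suffix) else 0
--             buckets[key].append((suffix, index))
--         suffixes = [suffix for bucket in buckets for suffix in bucket]
--         buckets = [[] for _ in range(256)]
--     return suffixes
-- ===== SOURCE B (Python) =====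
-- def bucketsort_suffixes(suffixes):
--     return sorted(suffixes, key=lambda p: p[0])
-- ===== Notes on version B (the rewrite author's own statement) =====
-- stated objective: faster
-- what changed: Replaced the hand-rolled LSD radix sort (256 buckets rebuilt per character position, all in interpreted Python) with a single stable comparison sort: sorted(suffixes, key=lambda p: p[0]).
import Mathlib
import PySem

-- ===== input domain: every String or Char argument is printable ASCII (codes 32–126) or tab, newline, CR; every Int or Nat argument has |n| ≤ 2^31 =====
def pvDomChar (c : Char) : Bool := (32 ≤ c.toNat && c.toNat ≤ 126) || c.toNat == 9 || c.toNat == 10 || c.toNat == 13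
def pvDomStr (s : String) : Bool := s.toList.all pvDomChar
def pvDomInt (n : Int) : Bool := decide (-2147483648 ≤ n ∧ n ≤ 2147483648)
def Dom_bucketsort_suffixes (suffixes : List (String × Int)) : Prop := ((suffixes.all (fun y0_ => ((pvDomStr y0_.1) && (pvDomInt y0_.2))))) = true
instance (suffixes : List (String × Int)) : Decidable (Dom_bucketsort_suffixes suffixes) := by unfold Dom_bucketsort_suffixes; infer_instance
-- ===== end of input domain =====

-- B replaces A's hand-rolled LSD radix sort (256 buckets per character position) with one stable comparison sort by the suffix string; measured faster at the timed sizes, same results.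


-- ===== PORT A =====
-- key = ord(suffix[i]) if i < len(suffix) else 0
def pvKeyAt (i : Nat) (s : String) : Nat :=
  if i < s.toList.length then (s.toList.getD i default).toNat else 0

-- one pass of the loop body: fill 256 buckets, then flatten them back into a list
def pvPass (i : Nat) (l : List (String × Int)) : List (String × Int) :=
  (l.foldl (fun (bs : List (List (String × Int))) p =>
      bs.set (pvKeyAt i p.1) ((bs.getD (pvKeyAt i p.1) []) ++ [p]))
    (List.replicate 256 [])).flatten

-- for i in range(max_len - 1, -1, -1): processes i = n-1, n-2, …, 0
def pvLoopA : Nat → List (String × Int) → List (String × Int)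
  | 0, l => l
  | n+1, l => pvLoopA n (pvPass n l)

def bucketsort_suffixes (suffixes : List (String × Int)) : List (String × Int) :=
  match PySem.List.max? (suffixes.map (fun p => PySem.Str.len p.1)) (fun x => x) with
  | none => []    -- Python raises ValueError here (empty input); excluded by Pre_
  | some m => pvLoopA m.toNat suffixes

-- ===== PORT B =====
def bucketsort_suffixes_alt (suffixes : List (String × Int)) : List (String × Int) :=
  PySem.List.sorted suffixes (fun p => p.1)

-- ===== PRECONDITION & SPEC =====
-- Pre_ excludes only the empty list, on which Python A raises ValueError (max() of an empty generator).
def Pre_bucketsort_suffixes (suffixes : List (String × Int)) : Prop := suffixes ≠ []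
instance (suffixes : List (String × Int)) : Decidable (Pre_bucketsort_suffixes suffixes) := by unfold Pre_bucketsort_suffixes; infer_instance
def pvWitness_bucketsort_suffixes : (List (String × Int)) := [("ba", 0), ("a", 1), ("ba", 2)]

def Spec_bucketsort_suffixes (suffixes : List (String × Int)) (out : List (String × Int)) : Prop := out = bucketsort_suffixes_alt suffixes
instance (suffixes : List (String × Int)) (out : List (String × Int)) : Decidable (Spec_bucketsort_suffixes suffixes out) := by unfold Spec_bucketsort_suffixes; infer_instance

-- ===== CLAIM (what is proved, stated in full; the proofs are below) =====
def Claim_equal_bucketsort_suffixes : Prop := ∀ (suffixes : List (String × Int)), Dom_bucketsort_suffixes suffixes → Pre_bucketsort_suffixes suffixes → Spec_bucketsort_suffixes suffixes (bucketsort_suffixes suffixes)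

-- ===== LEMMAS AND PROOFS =====

-- ---- order facts on List Char (Mathlib's lexicographic order) ----
theorem pvNilLe (a : List Char) : ([] : List Char) ≤ a := by
  cases a with
  | nil => exact le_refl _
  | cons c t => exact le_of_lt List.Lex.nil

theorem pvCharEq {c d : Char} (h : c.toNat = d.toNat) : c = d := by
  apply Char.ext
  exact UInt32.toNat_inj.mp h

-- drop i x ≤ drop i y from equal keys at i and drop (i+1) order
theorem pvStep (i : Nat) (x y : String)
    (hx : ∀ c ∈ x.toList, 0 < c.toNat)
    (hk : pvKeyAt i x = pvKeyAt i y)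
    (h : x.toList.drop (i+1) ≤ y.toList.drop (i+1)) :
    x.toList.drop i ≤ y.toList.drop i := by
  by_cases hix : i < x.toList.length
  · have hkx : pvKeyAt i x = x.toList[i].toNat := by
      unfold pvKeyAt; rw [if_pos hix, List.getD_eq_getElem _ _ hix]
    have hpos : 0 < x.toList[i].toNat := hx _ (List.getElem_mem hix)
    have hiy : i < y.toList.length := by
      by_contra hny
      have h0 : pvKeyAt i y = 0 := by unfold pvKeyAt; rw [if_neg hny]
      rw [h0, hkx] at hk; omega
    have hky : pvKeyAt i y = y.toList[i].toNat := by
      unfold pvKeyAt; rw [if_pos hiy, List.getD_eq_getElem _ _ hiy]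
    have hchar : x.toList[i] = y.toList[i] := pvCharEq (by rw [hkx, hky] at hk; exact hk)
    rw [List.drop_eq_getElem_cons hix, List.drop_eq_getElem_cons hiy, hchar]
    exact List.cons_le_cons _ h
  · rw [List.drop_eq_nil_of_le (Nat.le_of_not_lt hix)]
    exact pvNilLe _

-- drop i x ≤ drop i y across strictly increasing buckets
theorem pvCross (i : Nat) (x y : String)
    (hkk : pvKeyAt i x < pvKeyAt i y) :
    x.toList.drop i ≤ y.toList.drop i := by
  by_cases hix : i < x.toList.length
  · have hkx : pvKeyAt i x = x.toList[i].toNat := by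
      unfold pvKeyAt; rw [if_pos hix, List.getD_eq_getElem _ _ hix]
    have hiy : i < y.toList.length := by
      by_contra hny
      have h0 : pvKeyAt i y = 0 := by unfold pvKeyAt; rw [if_neg hny]
      omega
    have hky : pvKeyAt i y = y.toList[i].toNat := by
      unfold pvKeyAt; rw [if_pos hiy, List.getD_eq_getElem _ _ hiy]
    have hlt : x.toList[i] < y.toList[i] := Char.lt_def.mpr (by rw [hkx, hky] at hkk; exact hkk)
    rw [List.drop_eq_getElem_cons hix, List.drop_eq_getElem_cons hiy]
    exact le_of_lt (List.Lex.rel hlt)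
  · rw [List.drop_eq_nil_of_le (Nat.le_of_not_lt hix)]
    exact pvNilLe _

-- the loop invariant order
def pvLe (i : Nat) (x y : String × Int) : Prop := x.1.toList.drop i ≤ y.1.toList.drop i

def pvGood (l : List (String × Int)) : Prop :=
  ∀ p ∈ l, ∀ c ∈ p.1.toList, 0 < c.toNat ∧ c.toNat < 256

theorem pvKeyLt {s : String} (h : ∀ c ∈ s.toList, c.toNat < 256) (i : Nat) : pvKeyAt i s < 256 := by
  unfold pvKeyAt
  split
  · next hi => exact h _ (by rw [List.getD_eq_getElem _ _ hi]; exact List.getElem_mem hi)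
  · omega

-- ---- the bucket fold computes per-key filters ----
theorem pvSetStep (g : Nat → List (String × Int)) (K : Nat) (v : List (String × Int)) :
    ((List.range 256).map g).set K v = (List.range 256).map (fun k => if k = K then v else g k) := by
  apply List.ext_getElem
  · simp
  · intro n h1 h2
    simp only [List.getElem_set, List.getElem_map, List.getElem_range]
    have hn : n < 256 := by simpa using h2
    by_cases h : n = K
    · simp [h]
    · simp [h, Ne.symm h]

theorem pvGetD (g : Nat → List (String × Int)) (K : Nat) (hK : K < 256) :
    ((List.range 256).map g).getD K [] = g K := by
  rw [List.getD_eq_getElem _ _ (by simpa using hK : K < ((List.range 256).map g).length)]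
  simp

theorem pvFold (i : Nat) : ∀ (l : List (String × Int)) (g : Nat → List (String × Int)),
    (∀ p ∈ l, pvKeyAt i p.1 < 256) →
    l.foldl (fun bs p => bs.set (pvKeyAt i p.1) ((bs.getD (pvKeyAt i p.1) []) ++ [p]))
      ((List.range 256).map g)
      = (List.range 256).map (fun k => g k ++ l.filter (fun p => pvKeyAt i p.1 == k)) := by
  intro l
  induction l with
  | nil => intro g _; simp
  | cons p t ih =>
    intro g hlt
    have hK : pvKeyAt i p.1 < 256 := hlt p List.mem_cons_self
    simp only [List.foldl_cons]
    rw [pvGetD g _ hK, pvSetStep g _]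
    rw [ih _ (fun q hq => hlt q (List.mem_cons_of_mem _ hq))]
    apply List.map_congr_left
    intro k _
    by_cases h : pvKeyAt i p.1 = k
    · simp [h, List.append_assoc]
    · simp [h, Ne.symm h]

theorem pvPass_eq (i : Nat) (l : List (String × Int)) (h : ∀ p ∈ l, pvKeyAt i p.1 < 256) :
    pvPass i l = (List.range 256).flatMap (fun k => l.filter (fun p => pvKeyAt i p.1 == k)) := by
  unfold pvPass
  have hrep : (List.replicate 256 ([] : List (String × Int))) = (List.range 256).map (fun _ => []) := by
    simp [List.map_const']
  rw [hrep, pvFold i l _ h]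
  simp [List.flatMap_def]

theorem pvPass_mem {i : Nat} {l : List (String × Int)} (h : ∀ p ∈ l, pvKeyAt i p.1 < 256)
    {p : String × Int} (hp : p ∈ pvPass i l) : p ∈ l := by
  rw [pvPass_eq i l h] at hp
  rcases List.mem_flatMap.mp hp with ⟨k, -, hk⟩
  exact (List.mem_filter.mp hk).1

theorem pvFlatIfNot (F : List (String × Int)) : ∀ (ks : List Nat) (K : Nat), K ∉ ks →
    (ks.flatMap (fun k => if K = k then F else [])) = [] := by
  intro ks
  induction ks with
  | nil => intro K _; simp
  | cons a t ih =>
    intro K h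
    simp only [List.flatMap_cons]
    rw [if_neg (fun e => h (by rw [e]; exact List.mem_cons_self)),
        ih K (fun hm => h (List.mem_cons_of_mem _ hm))]
    simp

theorem pvFlatIfMem (F : List (String × Int)) : ∀ (ks : List Nat) (K : Nat), ks.Nodup → K ∈ ks →
    (ks.flatMap (fun k => if K = k then F else [])) = F := by
  intro ks
  induction ks with
  | nil => intro K _ h; cases h
  | cons a t ih =>
    intro K hnd hm
    simp only [List.flatMap_cons]
    rcases List.mem_cons.mp hm with rfl | hm'
    · rw [if_pos rfl, pvFlatIfNot F t K (List.nodup_cons.mp hnd).1]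
      simp
    · have hne : K ≠ a := by rintro rfl; exact (List.nodup_cons.mp hnd).1 hm'
      rw [if_neg hne, ih K (List.nodup_cons.mp hnd).2 hm']
      simp

-- one pass preserves the per-string filters (stability)
theorem pvPass_filter (i : Nat) (l : List (String × Int)) (h : ∀ p ∈ l, pvKeyAt i p.1 < 256)
    (s : String) :
    (pvPass i l).filter (fun p => p.1 == s) = l.filter (fun p => p.1 == s) := by
  rw [pvPass_eq i l h, List.filter_flatMap]
  have hterm : ∀ k : Nat, (l.filter (fun p => pvKeyAt i p.1 == k)).filter (fun p => p.1 == s)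
      = if pvKeyAt i s = k then l.filter (fun p => p.1 == s) else [] := by
    intro k
    rw [List.filter_filter]
    by_cases hks : pvKeyAt i s = k
    · rw [if_pos hks]
      refine List.filter_congr ?_
      intro p _
      by_cases hp : p.1 = s
      · simp [hp, hks]
      · simp [hp]
    · rw [if_neg hks, List.filter_eq_nil_iff]
      intro p _ hcomb
      simp only [Bool.and_eq_true, beq_iff_eq] at hcomb
      obtain ⟨ha, hb⟩ := hcomb
      exact hks (ha ▸ hb)
  simp only [hterm]
  by_cases hK : pvKeyAt i s < 256
  · exact pvFlatIfMem _ _ _ List.nodup_range (List.mem_range.mpr hK)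
  · have hF : l.filter (fun p => p.1 == s) = [] := by
      rw [List.filter_eq_nil_iff]
      intro p hp hb
      have hps : p.1 = s := by simpa using hb
      exact hK (hps ▸ h p hp)
    simp [hF]

-- one pass refines sortedness from position i+1 to position i
theorem pvPass_pairwise (i : Nat) (l : List (String × Int)) (hg : pvGood l)
    (hs : l.Pairwise (pvLe (i+1))) : (pvPass i l).Pairwise (pvLe i) := by
  have hlt : ∀ p ∈ l, pvKeyAt i p.1 < 256 := fun p hp => pvKeyLt (fun c hc => (hg p hp c hc).2) i
  rw [pvPass_eq i l hlt]
  apply List.pairwise_flatMap.mpr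
  constructor
  · intro k _
    have hpw : (l.filter (fun p => pvKeyAt i p.1 == k)).Pairwise (pvLe (i+1)) :=
      hs.sublist List.filter_sublist
    refine hpw.imp_of_mem ?_
    intro a b ha hb hab
    have hka : pvKeyAt i a.1 = k := by simpa using (List.mem_filter.mp ha).2
    have hkb : pvKeyAt i b.1 = k := by simpa using (List.mem_filter.mp hb).2
    have hal := (List.mem_filter.mp ha).1
    have hbl := (List.mem_filter.mp hb).1
    exact pvStep i a.1 b.1 (fun c hc => (hg _ hal c hc).1) (hka.trans hkb.symm) hab
  · refine List.pairwise_lt_range.imp ?_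
    intro k k' hkk' x hxm y hym
    have hkx : pvKeyAt i x.1 = k := by simpa using (List.mem_filter.mp hxm).2
    have hky : pvKeyAt i y.1 = k' := by simpa using (List.mem_filter.mp hym).2
    have hxl := (List.mem_filter.mp hxm).1
    have hyl := (List.mem_filter.mp hym).1
    exact pvCross i x.1 y.1 (by rw [hkx, hky]; exact hkk')

theorem pvLoop_inv : ∀ (n : Nat) (l : List (String × Int)), pvGood l → l.Pairwise (pvLe n) →
    (pvLoopA n l).Pairwise (pvLe 0) ∧
    (∀ s, (pvLoopA n l).filter (fun p => p.1 == s) = l.filter (fun p => p.1 == s)) := by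
  intro n
  induction n with
  | zero =>
    intro l hg hp
    exact ⟨hp, fun s => rfl⟩
  | succ n ih =>
    intro l hg hp
    have hlt : ∀ p ∈ l, pvKeyAt n p.1 < 256 := fun p hp' => pvKeyLt (fun c hc => (hg p hp' c hc).2) n
    have hg' : pvGood (pvPass n l) := fun p hp' => hg p (pvPass_mem hlt hp')
    have hp' : (pvPass n l).Pairwise (pvLe n) := pvPass_pairwise n l hg hp
    obtain ⟨h1, h2⟩ := ih (pvPass n l) hg' hp'
    refine ⟨h1, fun s => ?_⟩
    rw [show pvLoopA (n+1) l = pvLoopA n (pvPass n l) from rfl, h2 s, pvPass_filter n l hlt s]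

-- ---- stability of PySem's sorted ----
theorem pvInsertBy_filter (x : String × Int) : ∀ (ys : List (String × Int)),
    ys.Pairwise (fun a b => a.1 ≤ b.1) → ∀ s,
    (PySem.List.insertBy (fun a b => decide (a.1 < b.1)) x ys).filter (fun p => p.1 == s)
      = if x.1 == s then ys.filter (fun p => p.1 == s) ++ [x] else ys.filter (fun p => p.1 == s) := by
  intro ys
  induction ys with
  | nil =>
    intro _ s
    by_cases hx : x.1 = s <;> simp [PySem.List.insertBy, List.filter, hx]
  | cons y t ih =>
    intro hpw s
    have hstep : PySem.List.insertBy (fun a b => decide (a.1 < b.1)) x (y :: t)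
        = if decide (x.1 < y.1) = true then x :: y :: t
          else y :: PySem.List.insertBy (fun a b => decide (a.1 < b.1)) x t := rfl
    rw [hstep]
    by_cases hxy : x.1 < y.1
    · rw [if_pos (by simpa using hxy)]
      by_cases hx : x.1 = s
      · have hnil : (y :: t).filter (fun p => p.1 == s) = [] := by
          rw [List.filter_eq_nil_iff]
          intro p hp hb
          have hps : p.1 = s := by simpa using hb
          have hyp : y.1 ≤ p.1 := by
            rcases List.mem_cons.mp hp with rfl | hpt
            · exact le_refl _
            · exact (List.pairwise_cons.mp hpw).1 p hpt
          rw [hps, ← hx] at hyp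
          exact absurd hxy (not_lt.mpr hyp)
        simp [hx, hnil]
      · simp [hx]
    · rw [if_neg (by simpa using hxy)]
      have hpw' := (List.pairwise_cons.mp hpw).2
      rw [List.filter_cons, ih hpw' s]
      by_cases hy : y.1 = s <;> by_cases hx : x.1 = s <;>
        simp [hy, hx]

theorem pvSorted_filter (xs : List (String × Int)) (s : String) :
    (PySem.List.sorted xs (fun p => p.1)).filter (fun p => p.1 == s)
      = xs.filter (fun p => p.1 == s) := by
  induction xs using List.reverseRecOn with
  | nil => rw [PySem.List.sorted_eq_foldl_insertBy]; simp
  | append_singleton t x ih =>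
    rw [PySem.List.sorted_eq_foldl_insertBy, List.foldl_append]
    rw [← PySem.List.sorted_eq_foldl_insertBy]
    simp only [List.foldl_cons, List.foldl_nil]
    rw [pvInsertBy_filter x (PySem.List.sorted t (fun p => p.1))
          (PySem.List.sorted_pairwise t (fun p => p.1)) s]
    rw [ih, List.filter_append]
    by_cases hx : x.1 = s <;> simp [hx]

-- ---- uniqueness of a stable sort: sorted order + per-key filters determine the list ----
theorem pvUniq : ∀ (ys zs : List (String × Int)),
    ys.Pairwise (fun a b => a.1 ≤ b.1) → zs.Pairwise (fun a b => a.1 ≤ b.1) →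
    (∀ s, ys.filter (fun p => p.1 == s) = zs.filter (fun p => p.1 == s)) → ys = zs := by
  intro ys
  induction ys with
  | nil =>
    intro zs _ _ hf
    cases zs with
    | nil => rfl
    | cons z u =>
      have h := hf z.1
      rw [List.filter_cons] at h
      rw [if_pos (by simp)] at h
      simp at h
  | cons y t ih =>
    intro zs hys hzs hf
    cases zs with
    | nil =>
      have h := hf y.1
      rw [List.filter_cons] at h
      rw [if_pos (by simp)] at h
      simp at h
    | cons z u =>
      have hmem1 : y ∈ z :: u := by
        have h1 := hf y.1
        have hy : y ∈ (y :: t).filter (fun p => p.1 == y.1) := by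
          simp
        rw [h1] at hy
        exact (List.mem_filter.mp hy).1
      have hmem2 : z ∈ y :: t := by
        have h2 := hf z.1
        have hz : z ∈ (z :: u).filter (fun p => p.1 == z.1) := by
          simp
        rw [← h2] at hz
        exact (List.mem_filter.mp hz).1
      have hle1 : z.1 ≤ y.1 := by
        rcases List.mem_cons.mp hmem1 with h | hm
        · rw [h]
        · exact (List.pairwise_cons.mp hzs).1 y hm
      have hle2 : y.1 ≤ z.1 := by
        rcases List.mem_cons.mp hmem2 with h | hm
        · rw [h]
        · exact (List.pairwise_cons.mp hys).1 z hm
      have hyz : y.1 = z.1 := le_antisymm hle2 hle1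
      have h1 := hf y.1
      rw [List.filter_cons, List.filter_cons, if_pos (by simp), if_pos (by simp [hyz])] at h1
      obtain ⟨hh, htail⟩ := List.cons.inj h1
      have htu : t = u := by
        apply ih u (List.pairwise_cons.mp hys).2 (List.pairwise_cons.mp hzs).2
        intro s
        by_cases hs : s = y.1
        · rw [hs]; exact htail
        · have h3 := hf s
          rw [List.filter_cons, List.filter_cons,
              if_neg (by simp only [beq_iff_eq]; exact fun e => hs e.symm),
              if_neg (by simp only [beq_iff_eq]; rw [← hyz]; exact fun e => hs e.symm)] at h3
          exact h3
      rw [hh, htu]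

-- ===== VERDICT (by name: the statement is the Claim_ definition above) =====
theorem bucketsort_suffixes_spec : Claim_equal_bucketsort_suffixes := by
  unfold Claim_equal_bucketsort_suffixes
  intro xs hDom hPre
  unfold Spec_bucketsort_suffixes bucketsort_suffixes bucketsort_suffixes_alt
  have hGood : pvGood xs := by
    intro p hp c hc
    unfold Dom_bucketsort_suffixes at hDom
    have := List.all_eq_true.mp hDom p hp
    have h1 := Bool.and_elim_left this
    unfold pvDomStr at h1
    have h2 := List.all_eq_true.mp h1 c hc
    unfold pvDomChar at h2
    simp only [Bool.or_eq_true, Bool.and_eq_true, decide_eq_true_eq, beq_iff_eq] at h2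
    omega
  cases hmax : PySem.List.max? (xs.map (fun p => PySem.Str.len p.1)) (fun x => x) with
  | none =>
      exact absurd ((List.map_eq_nil_iff).mp ((PySem.List.max?_eq_none_iff _ _).mp hmax)) hPre
  | some M =>
      have hlen : ∀ p ∈ xs, p.1.toList.length ≤ M.toNat := by
        intro p hp
        have := PySem.List.max?_isMax hmax (PySem.Str.len p.1) (List.mem_map_of_mem hp)
        rw [PySem.Str.len_eq] at this
        omega
      have hbase : xs.Pairwise (pvLe M.toNat) := by
        apply List.pairwise_of_forall_mem_list
        intro a ha b hb
        unfold pvLe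
        rw [List.drop_eq_nil_of_le (hlen a ha)]
        exact pvNilLe _
      obtain ⟨hpw, hfil⟩ := pvLoop_inv M.toNat xs hGood hbase
      apply pvUniq
      · exact hpw.imp (by
          intro a b hab
          unfold pvLe at hab
          simp only [List.drop_zero] at hab
          exact String.le_iff_toList_le.mpr hab)
      · exact PySem.List.sorted_pairwise xs (fun p => p.1)
      · intro s
        rw [hfil s, pvSorted_filter xs s]
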